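-- pv_equiv track=rewrite | github.com/SidneyLYZhang/simtoolsz | src/simtoolsz/reader.py | _find_marker_index
-- ===== SOURCE A (Python) =====
-- from typing import Optional, Callable
--
-- def _find_marker_index(
--     lines: list[str],
--     marker: Optional[str],
--     find_first: bool = True,
--     start_from: Optional[int] = None
-- ) -> Optional[int]:
--     """
--     查找标记行的索引。
--
--     Args:
--         lines: 行列表
--         marker: 标记字符串（匹配行的前缀）
--         find_first: True 返回第一个匹配，False 返回最后一个匹配
--         start_from: 开始搜索的索引
--
--     Returns:
--         Optional[int]: 标记行的索引，未找到返回 None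
--     """
--     if marker is None:
--         return None
--
--     search_range = range(
--         start_from + 1 if start_from is not None else 0,
--         len(lines)
--     )
--
--     if find_first:
--         for i in search_range:
--             if lines[i].lstrip().startswith(marker):
--                 return i
--         return None
--     else:
--         result = None
--         for i in search_range:
--             if lines[i].lstrip().startswith(marker):
--                 result = i
--         return result
-- ===== SOURCE B (Python) =====
-- def _find_marker_index(lines, marker, find_first=True, start_from=None):
--     if marker is None:
--         return None
--     search_range = range(
--         start_from + 1 if start_from is not None else 0,
--         len(lines)
--     )
--     matches = [i for i in search_range if lines[i].lstrip().startswith(marker)]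
--     if not matches:
--         return None
--     return matches[0] if find_first else matches[-1]
-- ===== Notes on version B (the rewrite author's own statement) =====
-- stated objective: simpler
-- what changed: Replaces A's two mode-specific search loops (early-return first-match loop and accumulator last-match loop) by one collection pass building the list of all matching indices, followed by a constant-time first/last selection.
import Mathlib
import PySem

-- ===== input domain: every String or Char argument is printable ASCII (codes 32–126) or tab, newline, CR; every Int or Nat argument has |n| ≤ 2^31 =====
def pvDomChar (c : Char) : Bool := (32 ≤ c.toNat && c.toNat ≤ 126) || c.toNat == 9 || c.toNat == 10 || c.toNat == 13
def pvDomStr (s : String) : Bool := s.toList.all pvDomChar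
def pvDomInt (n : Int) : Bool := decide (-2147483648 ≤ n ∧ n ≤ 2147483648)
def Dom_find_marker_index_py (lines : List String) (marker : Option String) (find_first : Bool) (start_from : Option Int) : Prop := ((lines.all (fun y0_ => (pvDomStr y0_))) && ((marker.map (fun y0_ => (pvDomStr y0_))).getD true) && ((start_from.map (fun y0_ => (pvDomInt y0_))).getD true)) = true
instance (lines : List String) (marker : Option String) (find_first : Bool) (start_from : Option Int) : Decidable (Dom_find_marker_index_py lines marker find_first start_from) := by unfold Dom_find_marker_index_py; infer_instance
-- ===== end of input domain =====

-- B collapses A's two mode-specific loops into one collection pass over the same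
-- search range followed by a constant-time first/last selection (objective: simpler).
-- ===== PORT A =====
-- line i ms: lines[i].lstrip().startswith(marker); lines[i] via pyGet? (IndexError
-- cases are excluded by Pre_, so the .getD "" default is never reached inside Pre_)
def pvMatch (lines : List String) (m : String) (i : Int) : Bool :=
  PySem.Str.startswith (PySem.Str.lstrip ((PySem.List.pyGet? lines i).getD "")) m

-- A's find_first loop with early return
def pvFindFirstA (lines : List String) (m : String) : List Int → Option Int
  | [] => none
  | i :: rest => if pvMatch lines m i then some i else pvFindFirstA lines m rest

-- A's last-match loop carrying the 'result' accumulator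
def pvFindLastA (lines : List String) (m : String) (result : Option Int) : List Int → Option Int
  | [] => result
  | i :: rest =>
      if pvMatch lines m i then pvFindLastA lines m (some i) rest
      else pvFindLastA lines m result rest

def find_marker_index_py (lines : List String) (marker : Option String) (find_first : Bool) (start_from : Option Int) : Option Int :=
  match marker with
  | none => none
  | some m =>
    let search_range := PySem.List.pyRange (match start_from with | some s => s + 1 | none => 0) ((lines.length : Int)) 1
    if find_first then pvFindFirstA lines m search_range
    else pvFindLastA lines m none search_range

-- ===== PORT B =====
def find_marker_index_py_alt (lines : List String) (marker : Option String) (find_first : Bool) (start_from : Option Int) : Option Int :=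
  match marker with
  | none => none
  | some m =>
    let search_range := PySem.List.pyRange (match start_from with | some s => s + 1 | none => 0) ((lines.length : Int)) 1
    let ms := search_range.filter (fun i => pvMatch lines m i)
    if ms.isEmpty then none
    else if find_first then ms.head? else ms.getLast?

-- ===== PRECONDITION & SPEC =====
-- Pre_ excludes exactly the inputs where A raises IndexError: a given start_from with
-- start_from + 1 < -len(lines) makes the loop read lines[i] with i below -len(lines).
def Pre_find_marker_index_py (lines : List String) (marker : Option String) (find_first : Bool) (start_from : Option Int) : Prop :=
  match marker, start_from with
  | some _, some s => -(lines.length : Int) ≤ s + 1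
  | _, _ => True

instance (lines : List String) (marker : Option String) (find_first : Bool) (start_from : Option Int) : Decidable (Pre_find_marker_index_py lines marker find_first start_from) := by
  unfold Pre_find_marker_index_py
  cases marker <;> cases start_from <;> infer_instance

def pvWitness_find_marker_index_py : List String × Option String × Bool × Option Int := (["  abc", "x", "abd"], some "ab", true, some 0)

def Spec_find_marker_index_py (lines : List String) (marker : Option String) (find_first : Bool) (start_from : Option Int) (out : Option Int) : Prop := out = find_marker_index_py_alt lines marker find_first start_from
instance (lines : List String) (marker : Option String) (find_first : Bool) (start_from : Option Int) (out : Option Int) : Decidable (Spec_find_marker_index_py lines marker find_first start_from out) := by unfold Spec_find_marker_index_py; infer_instance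

-- ===== CLAIM (what is proved, stated in full; the proofs are below) =====
def Claim_equal_find_marker_index_py : Prop := ∀ (lines : List String) (marker : Option String) (find_first : Bool) (start_from : Option Int), Dom_find_marker_index_py lines marker find_first start_from → Pre_find_marker_index_py lines marker find_first start_from → Spec_find_marker_index_py lines marker find_first start_from (find_marker_index_py lines marker find_first start_from)

-- ===== LEMMAS AND PROOFS =====

-- A's early-return loop returns the head of the filtered list
theorem pvFindFirstA_eq_filter_head (lines : List String) (m : String) (l : List Int) :
    pvFindFirstA lines m l = (l.filter (fun i => pvMatch lines m i)).head? := by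
  induction l with
  | nil => rfl
  | cons i rest ih =>
    simp only [pvFindFirstA, List.filter_cons]
    by_cases h : pvMatch lines m i
    · simp [h]
    · simp [h, ih]

-- A's accumulator loop returns the last of the filtered list, falling back to the accumulator
theorem pvFindLastA_eq_filter_getLast (lines : List String) (m : String) (acc : Option Int) (l : List Int) :
    pvFindLastA lines m acc l = ((l.filter (fun i => pvMatch lines m i)).getLast?).or acc := by
  induction l generalizing acc with
  | nil => rfl
  | cons i rest ih =>
    simp only [pvFindLastA, List.filter_cons]
    by_cases h : pvMatch lines m i
    · simp only [h, if_pos, ih]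
      rw [List.getLast?_cons]
      cases hr : (rest.filter (fun i => pvMatch lines m i)).getLast? <;> simp [hr, Option.or]
    · simp [h, ih]

-- ===== VERDICT (by name: the statement is the Claim_ definition above) =====
-- combining lemma: A's branch-selected loop equals B's filter-then-select, for any index list
theorem pvSelect_eq (lines : List String) (m : String) (ff : Bool) (l : List Int) :
    (if ff then pvFindFirstA lines m l else pvFindLastA lines m none l) =
    (if (l.filter (fun i => pvMatch lines m i)).isEmpty then none
     else if ff then (l.filter (fun i => pvMatch lines m i)).head?
     else (l.filter (fun i => pvMatch lines m i)).getLast?) := by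
  cases ff with
  | true =>
    rw [if_pos rfl, pvFindFirstA_eq_filter_head]
    cases hfl : l.filter (fun i => pvMatch lines m i) with
    | nil => simp [hfl]
    | cons a t => simp [hfl]
  | false =>
    simp only [Bool.false_eq_true, if_false]
    rw [pvFindLastA_eq_filter_getLast]
    cases hfl : l.filter (fun i => pvMatch lines m i) with
    | nil => simp [hfl, Option.or]
    | cons a t =>
      simp only [hfl, List.isEmpty_cons, Bool.false_eq_true, if_false]
      cases hr : (a :: t).getLast? <;> simp_all [Option.or]

theorem find_marker_index_py_spec : Claim_equal_find_marker_index_py := by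
  intro lines marker find_first start_from _ _
  unfold Spec_find_marker_index_py find_marker_index_py find_marker_index_py_alt
  cases marker with
  | none => rfl
  | some m => exact pvSelect_eq lines m find_first _
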